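-- pv_equiv track=rewrite | github.com/HJinS/AlgorithmPractice | programmers/tmp/826112.py | solution
-- ===== SOURCE A (Python) =====
-- def solution(price, money, count):
--
--     total_cnt = 0
--
--     for i in range(1, count+1):
--         total_cnt += price * i
--
--     if total_cnt > money:
--         return total_cnt - money
--     else:
--         return 0
-- ===== SOURCE B (Python) =====
-- def solution(price, money, count):
--     n = count if count > 0 else 0
--     shortfall = price * n * (n + 1) // 2 - money
--     return shortfall if shortfall > 0 else 0
-- ===== Notes on version B (the rewrite author's own statement) =====
-- stated objective: faster
-- what changed: replaces the O(count) accumulation loop by the arithmetic-series closed form price*n*(n+1)//2 with n = max(count,0), then clamps the shortfall at 0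
import Mathlib
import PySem

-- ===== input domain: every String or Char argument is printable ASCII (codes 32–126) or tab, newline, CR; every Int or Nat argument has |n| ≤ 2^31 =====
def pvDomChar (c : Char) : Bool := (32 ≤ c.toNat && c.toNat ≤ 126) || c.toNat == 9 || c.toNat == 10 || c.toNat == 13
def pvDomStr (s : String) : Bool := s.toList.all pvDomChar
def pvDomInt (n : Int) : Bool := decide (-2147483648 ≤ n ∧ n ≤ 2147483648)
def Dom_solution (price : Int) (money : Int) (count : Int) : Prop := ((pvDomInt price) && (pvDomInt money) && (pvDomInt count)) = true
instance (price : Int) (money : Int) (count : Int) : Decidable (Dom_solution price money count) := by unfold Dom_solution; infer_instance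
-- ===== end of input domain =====

-- B replaces A's O(count) accumulation loop by the arithmetic-series closed form (O(1)).

-- ===== PORT A =====
def solution (price : Int) (money : Int) (count : Int) : Int :=
  let total_cnt : Int := 0
  let total_cnt := (PySem.List.pyRange 1 (count + 1) 1).foldl
    (fun total_cnt i => total_cnt + price * i) total_cnt
  if total_cnt > money then total_cnt - money else 0

-- ===== PORT B =====
def solution_alt (price : Int) (money : Int) (count : Int) : Int :=
  let n : Int := if count > 0 then count else 0
  let shortfall : Int := PySem.Int.floordiv (price * n * (n + 1)) 2 - money
  if shortfall > 0 then shortfall else 0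

-- ===== PRECONDITION & SPEC =====
def Spec_solution (price : Int) (money : Int) (count : Int) (out : Int) : Prop := out = solution_alt price money count
instance (price : Int) (money : Int) (count : Int) (out : Int) : Decidable (Spec_solution price money count out) := by unfold Spec_solution; infer_instance

-- ===== CLAIM (what is proved, stated in full; the proofs are below) =====
def Claim_equal_solution : Prop := ∀ (price : Int) (money : Int) (count : Int), Dom_solution price money count → Spec_solution price money count (solution price money count)

-- ===== LEMMAS AND PROOFS =====

-- triangular number, proof-only helper
def pvTri : Nat → Int
  | 0 => 0
  | k + 1 => pvTri k + (k + 1)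

theorem pvTri_double (k : Nat) : 2 * pvTri k = (k : Int) * (k + 1) := by
  induction k with
  | zero => simp [pvTri]
  | succ k ih => simp only [pvTri]; push_cast; linarith [ih]

theorem pv_foldl_tri (price : Int) (k : Nat) :
    (PySem.List.pyRange 1 ((k : Int) + 1) 1).foldl (fun acc i => acc + price * i) 0
      = price * pvTri k := by
  induction k with
  | zero => simp [PySem.List.pyRange_one_eq_nil, pvTri]
  | succ k ih =>
      
      rw [show ((k + 1 : Nat) : Int) + 1 = ((k : Int) + 1) + 1 by push_cast; ring,
          PySem.List.pyRange_one_succ_right (by omega), List.foldl_append, ih]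
      simp [pvTri]; push_cast; ring

theorem pv_fdiv_two (x : Int) : PySem.Int.floordiv (2 * x) 2 = x := by
  rw [PySem.Int.floordiv_eq_ediv_of_pos (by norm_num)]
  omega

theorem solution_eq (price money count : Int) :
    solution price money count = solution_alt price money count := by
  simp only [solution, solution_alt]
  by_cases h : count > 0
  · obtain ⟨k, hk⟩ : ∃ k : Nat, count = (k : Int) := ⟨count.toNat, by omega⟩
    subst hk
    rw [pv_foldl_tri price k]
    have : price * (k : Int) * ((k : Int) + 1) = 2 * (price * pvTri k) := by
      linear_combination -price * pvTri_double k
    simp only [if_pos h, this, pv_fdiv_two]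
    split_ifs with h1 h2 h3 <;> omega
  · rw [PySem.List.pyRange_one_eq_nil (by omega)]
    have hn : (if count > 0 then count else 0) = 0 := by simp [h]
    simp only [List.foldl_nil, hn, mul_zero, zero_mul]
    rw [show PySem.Int.floordiv 0 2 = 0 from by
      rw [PySem.Int.floordiv_eq_ediv_of_pos (by norm_num)]; simp]
    split_ifs with h1 h2 h3 <;> omega

-- ===== VERDICT (by name: the statement is the Claim_ definition above) =====
theorem solution_spec : Claim_equal_solution := by
  intro price money count _
  exact solution_eq price money count
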